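-- pv_equiv track=rewrite | github.com/pypi-data/pypi-mirror-324 | packages/delos-unichunking/delos_unichunking-0.8.18-py3-none-any.whl/unichunking/formating/pages.py | _find_possible_pages
-- ===== SOURCE A (Python) =====
-- def _find_possible_pages(
--     cur_page: int,
--     pages_reach: int,
--     pages: list[list[str]],
-- ) -> list[int]:
--     possible_pages: list[int] = [cur_page]
--     for _ in range(pages_reach):
--         for page_idx in range(possible_pages[-1] + 1, len(pages)):
--             if any(block for block in pages[page_idx]):
--                 possible_pages.append(page_idx)
--                 return possible_pages
--     return possible_pages
-- ===== SOURCE B (Python) =====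
-- def _find_possible_pages(
--     cur_page: int,
--     pages_reach: int,
--     pages: list[list[str]],
-- ) -> list[int]:
--     possible_pages = [cur_page]
--     if pages_reach < 1:
--         return possible_pages
--     nonempty = [idx for idx, page in enumerate(pages) if any(page)]
--     lo, hi = 0, len(nonempty)
--     while lo < hi:
--         mid = (lo + hi) // 2
--         if nonempty[mid] <= cur_page:
--             lo = mid + 1
--         else:
--             hi = mid
--     if lo < len(nonempty):
--         possible_pages.append(nonempty[lo])
--     return possible_pages
-- ===== Notes on version B (the rewrite author's own statement) =====
-- stated objective: faster
-- what changed: A repeats an identical linear forward scan up to pages_reach times; B builds the sorted list of non-empty page indices in one enumerate pass and binary-searches it for the first index greater than cur_page.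
-- intended difference: For cur_page <= -2 with -len(pages) <= cur_page+1 and a non-empty page among the wrapped slots pages[len(pages)+cur_page+1:], A's scan starts at the negative index cur_page+1 and returns that negative wrapped index (e.g. [-2, -1]), while B returns the first non-empty page index >= 0 (or just [cur_page]); a real page index, not a negative alias, is the intended 'next page after cur_page'. — e.g. on _find_possible_pages(-2, 1, [["a"]]): A returns [-2, -1], B returns [-2, 0]
import Mathlib
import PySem

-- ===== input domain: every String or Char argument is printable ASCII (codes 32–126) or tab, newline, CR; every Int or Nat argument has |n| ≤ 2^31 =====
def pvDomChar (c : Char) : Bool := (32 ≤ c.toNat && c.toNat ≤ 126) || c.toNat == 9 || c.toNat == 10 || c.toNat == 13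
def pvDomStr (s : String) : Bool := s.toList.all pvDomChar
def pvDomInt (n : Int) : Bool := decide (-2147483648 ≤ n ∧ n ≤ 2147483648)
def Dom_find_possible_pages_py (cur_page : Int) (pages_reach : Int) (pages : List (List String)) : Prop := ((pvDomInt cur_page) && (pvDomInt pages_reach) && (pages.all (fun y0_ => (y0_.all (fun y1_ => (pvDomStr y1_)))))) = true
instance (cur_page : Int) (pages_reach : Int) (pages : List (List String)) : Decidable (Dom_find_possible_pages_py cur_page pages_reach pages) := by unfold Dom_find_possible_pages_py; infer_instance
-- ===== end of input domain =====

-- B replaces A's pages_reach-fold repeated linear scan by one enumerate pass collecting the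
-- non-empty page indices plus a binary search for the first one greater than cur_page.

-- ===== PORT A =====
-- inner 'for page_idx in …: if any(...): append and return'; none = fell through (or, outside
-- Pre_, the IndexError of pages[page_idx])
def fppInnerA (possible_pages : List Int) (pages : List (List String)) (idxs : List Int) :
    Option (List Int) :=
  match idxs with
  | [] => none
  | i :: rest =>
    match PySem.List.pyGet? pages i with
    | none => none  -- IndexError in Python; unreached inside Pre_
    | some pg =>
      if pg.any (fun block => block ≠ "") then some (possible_pages ++ [i])
      else fppInnerA possible_pages pages rest

-- outer 'for _ in range(pages_reach)'
def fppOuterA (pages : List (List String)) : Nat → List Int → List Int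
  | 0, possible_pages => possible_pages
  | Nat.succ k, possible_pages =>
    match fppInnerA possible_pages pages
        (PySem.List.pyRange (PySem.List.pyGetD possible_pages (-1) 0 + 1)
          (pages.length : Int) 1) with
    | some res => res
    | none => fppOuterA pages k possible_pages

def find_possible_pages_py (cur_page : Int) (pages_reach : Int) (pages : List (List String)) : List Int :=
  fppOuterA pages pages_reach.toNat [cur_page]

-- ===== PORT B =====
-- '[idx for idx, page in enumerate(pages) if any(page)]'
def fppNonempty (pages : List (List String)) : List Int :=
  (PySem.List.enumerate pages 0).filterMap
    (fun p => if p.2.any (fun block => block ≠ "") then some p.1 else none)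

-- the 'while lo < hi' binary-search loop; fuel = hi - lo bounds the iteration count exactly
def fppBSAux (ne : List Int) (cur : Int) : Nat → Nat → Nat → Nat
  | 0, lo, _ => lo
  | Nat.succ fuel, lo, hi =>
    if lo < hi then
      let mid := (lo + hi) / 2
      if ne.getD mid 0 ≤ cur then fppBSAux ne cur fuel (mid + 1) hi
      else fppBSAux ne cur fuel lo mid
    else lo

def fppBS (ne : List Int) (cur : Int) (lo hi : Nat) : Nat :=
  fppBSAux ne cur (hi - lo) lo hi

def find_possible_pages_py_alt (cur_page : Int) (pages_reach : Int) (pages : List (List String)) : List Int :=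
  if pages_reach < 1 then [cur_page]
  else
    let ne := fppNonempty pages
    let lo := fppBS ne cur_page 0 ne.length
    if lo < ne.length then [cur_page, ne.getD lo 0] else [cur_page]

-- ===== PRECONDITION & SPEC =====
-- Pre_ excludes exactly the inputs where A raises IndexError: pages_reach >= 1 and
-- cur_page + 1 < -len(pages), so the first scanned index underflows Python's negative indexing.
def Pre_find_possible_pages_py (cur_page : Int) (pages_reach : Int) (pages : List (List String)) : Prop :=
  pages_reach < 1 ∨ -(pages.length : Int) ≤ cur_page + 1
instance (cur_page : Int) (pages_reach : Int) (pages : List (List String)) : Decidable (Pre_find_possible_pages_py cur_page pages_reach pages) := by unfold Pre_find_possible_pages_py; infer_instance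

def pvWitness_find_possible_pages_py : Int × Int × List (List String) := (0, 2, [["", ""], ["a"]])

-- For cur_page ≤ -2 with -len(pages) ≤ cur_page+1 and some non-empty page among the wrapped
-- slots pages[len+cur_page+1:], A's scan starts at the negative index cur_page+1 and returns
-- that negative wrapped index, while B returns the first non-empty page index ≥ 0 (or just
-- [cur_page]); a real page index, not a negative alias, is the intended 'next page'.
def D_find_possible_pages_py (cur_page : Int) (pages_reach : Int) (pages : List (List String)) : Prop :=
  1 ≤ pages_reach ∧ -(pages.length : Int) ≤ cur_page + 1 ∧ cur_page + 1 < 0 ∧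
    ∃ j < pages.length, (pages.length : Int) + cur_page + 1 ≤ (j : Int) ∧
      (pages.getD j []).any (fun block => block ≠ "") = true
instance (cur_page : Int) (pages_reach : Int) (pages : List (List String)) : Decidable (D_find_possible_pages_py cur_page pages_reach pages) := by unfold D_find_possible_pages_py; infer_instance

def Spec_find_possible_pages_py (cur_page : Int) (pages_reach : Int) (pages : List (List String)) (out : List Int) : Prop := ¬ D_find_possible_pages_py cur_page pages_reach pages → out = find_possible_pages_py_alt cur_page pages_reach pages
instance (cur_page : Int) (pages_reach : Int) (pages : List (List String)) (out : List Int) : Decidable (Spec_find_possible_pages_py cur_page pages_reach pages out) := by unfold Spec_find_possible_pages_py; infer_instance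

def pvDiffWitness_find_possible_pages_py : Int × Int × List (List String) := (-2, 1, [["a"]])
def pvDiffWitnessOut_find_possible_pages_py : (List Int) × (List Int) := ([-2, -1], [-2, 0])

-- ===== CLAIM (what is proved, stated in full; the proofs are below) =====
def Claim_unchanged_find_possible_pages_py : Prop := ∀ (cur_page : Int) (pages_reach : Int) (pages : List (List String)), Dom_find_possible_pages_py cur_page pages_reach pages → Pre_find_possible_pages_py cur_page pages_reach pages → Spec_find_possible_pages_py cur_page pages_reach pages (find_possible_pages_py cur_page pages_reach pages)
def Claim_changed_find_possible_pages_py : Prop := Dom_find_possible_pages_py (pvDiffWitness_find_possible_pages_py.1) (pvDiffWitness_find_possible_pages_py.2.1) (pvDiffWitness_find_possible_pages_py.2.2) ∧ Pre_find_possible_pages_py (pvDiffWitness_find_possible_pages_py.1) (pvDiffWitness_find_possible_pages_py.2.1) (pvDiffWitness_find_possible_pages_py.2.2) ∧ D_find_possible_pages_py (pvDiffWitness_find_possible_pages_py.1) (pvDiffWitness_find_possible_pages_py.2.1) (pvDiffWitness_find_possible_pages_py.2.2) ∧ find_possible_pages_py (pvDiffWitness_find_possible_pages_py.1) (pvDiffWitness_find_possible_pages_py.2.1)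 (pvDiffWitness_find_possible_pages_py.2.2) = pvDiffWitnessOut_find_possible_pages_py.1 ∧ find_possible_pages_py_alt (pvDiffWitness_find_possible_pages_py.1) (pvDiffWitness_find_possible_pages_py.2.1) (pvDiffWitness_find_possible_pages_py.2.2) = pvDiffWitnessOut_find_possible_pages_py.2 ∧ pvDiffWitnessOut_find_possible_pages_py.1 ≠ pvDiffWitnessOut_find_possible_pages_py.2
def Claim_exact_find_possible_pages_py : Prop := ∀ (cur_page : Int) (pages_reach : Int) (pages : List (List String)), Dom_find_possible_pages_py cur_page pages_reach pages → Pre_find_possible_pages_py cur_page pages_reach pages → D_find_possible_pages_py cur_page pages_reach pages → find_possible_pages_py cur_page pages_reach pages ≠ find_possible_pages_py_alt cur_page pages_reach pages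

-- ===== LEMMAS AND PROOFS =====

-- the predicate both scans test on a page fetched at (possibly negative) index j
def fppGood (pages : List (List String)) (j : Int) : Bool :=
  ((PySem.List.pyGet? pages j).getD []).any (fun block => block ≠ "")

-- when every scanned index is in range, A's inner loop is a find? over the index list
theorem fppInnerA_eq_find (pp : List Int) (pages : List (List String)) (idxs : List Int)
    (h : ∀ i ∈ idxs, (PySem.List.pyGet? pages i).isSome) :
    fppInnerA pp pages idxs =
      (idxs.find? (fppGood pages)).map (fun i => pp ++ [i]) := by
  induction idxs with
  | nil => rfl
  | cons i rest ih =>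
    have hi := h i (List.mem_cons_self ..)
    obtain ⟨pg, hpg⟩ := Option.isSome_iff_exists.mp hi
    simp only [fppInnerA, List.find?, fppGood, hpg, Option.getD_some, decide_not]
    cases hp : pg.any (fun b => !decide (b = "")) with
    | true => simp
    | false =>
      simp only [Bool.false_eq_true, if_neg, not_false_iff]
      exact ih (fun j hj => h j (List.mem_cons_of_mem _ hj))

-- if one iteration of the scan finds nothing, all remaining identical iterations find nothing
theorem fppOuterA_of_none (pages : List (List String)) (pp : List Int)
    (h : fppInnerA pp pages
      (PySem.List.pyRange (PySem.List.pyGetD pp (-1) 0 + 1) (pages.length : Int) 1) = none) :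
    ∀ k, fppOuterA pages k pp = pp := by
  intro k
  induction k with
  | zero => rfl
  | succ k ih => simp [fppOuterA, h, ih]

theorem fppRange_inRange (cur_page : Int) (pages : List (List String))
    (hpre : -(pages.length : Int) ≤ cur_page + 1) :
    ∀ i ∈ PySem.List.pyRange (cur_page + 1) (pages.length : Int) 1,
      (PySem.List.pyGet? pages i).isSome := by
  intro i hi
  rw [PySem.List.mem_pyRange_one] at hi
  rw [Option.isSome_iff_ne_none]
  intro hnone
  rw [PySem.List.pyGet?_eq_none_iff] at hnone
  exact hnone ⟨by omega, hi.2⟩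

-- A, for pages_reach ≥ 1 inside Pre_, is [cur_page] extended by the first hit of one scan
theorem fppA_eq (cur_page : Int) (pages_reach : Int) (pages : List (List String))
    (hpr : ¬ pages_reach < 1) (hpre : -(pages.length : Int) ≤ cur_page + 1) :
    find_possible_pages_py cur_page pages_reach pages =
      match (PySem.List.pyRange (cur_page + 1) (pages.length : Int) 1).find? (fppGood pages) with
      | none => [cur_page]
      | some i => [cur_page, i] := by
  unfold find_possible_pages_py
  obtain ⟨k, hk⟩ : ∃ k, pages_reach.toNat = k + 1 := ⟨pages_reach.toNat - 1, by omega⟩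
  rw [hk]
  simp only [fppOuterA]
  have hone : ([] : List Int) ++ [cur_page] = [cur_page] := rfl
  have hlast : PySem.List.pyGetD [cur_page] (-1) 0 = cur_page := by
    rw [← hone, PySem.List.pyGetD_neg_one_append_singleton]
  rw [hlast, fppInnerA_eq_find [cur_page] pages _ (fppRange_inRange cur_page pages hpre)]
  rcases hfind : (PySem.List.pyRange (cur_page + 1) (pages.length : Int) 1).find? (fppGood pages)
      with _ | i
  · rw [Option.map_none]
    rw [fppOuterA_of_none pages [cur_page]
      (by rw [hlast, fppInnerA_eq_find [cur_page] pages _ (fppRange_inRange cur_page pages hpre), hfind]; rfl)]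
  · simp

-- find? through the 'if g then some j else none' filterMap of B's comprehension
theorem find?_filterMap_if (l : List Int) (g p : Int → Bool) :
    (l.filterMap (fun j => if g j then some j else none)).find? p
      = l.find? (fun j => g j && p j) := by
  induction l with
  | nil => rfl
  | cons a l ih =>
    by_cases hg : g a = true
    · by_cases hp : p a = true
      · simp [hg, List.find?, hp]
      · simp only [List.filterMap_cons, hg, if_pos, List.find?]
        simp only [Bool.not_eq_true] at hp
        simp [hp, ih]
    · simp only [Bool.not_eq_true] at hg
      simp [hg, ih]

theorem fppNonempty_eq (pages : List (List String)) :
    fppNonempty pages =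
      (PySem.List.pyRange 0 (pages.length : Int) 1).filterMap
        (fun j => if fppGood pages j then some j else none) := by
  unfold fppNonempty fppGood
  rw [PySem.List.enumerate_eq_map_pyRange pages [], List.filterMap_map]
  rfl

-- the comprehension keeps indices in order: pairwise-< survives the filterMap
theorem pairwise_filterMap_if (g : Int → Bool) :
    ∀ (l : List Int), l.Pairwise (· < ·) →
      (l.filterMap (fun j => if g j then some j else none)).Pairwise (· < ·) := by
  intro l
  induction l with
  | nil => intro _; simp
  | cons a l ih =>
    intro h
    rw [List.pairwise_cons] at h
    rw [List.filterMap_cons]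
    by_cases hg : g a = true
    · rw [if_pos hg, List.pairwise_cons]
      refine ⟨?_, ih h.2⟩
      intro b hb
      obtain ⟨j, hj, hjb⟩ := List.mem_filterMap.mp hb
      by_cases hgj : g j = true
      · rw [if_pos hgj, Option.some.injEq] at hjb
        subst hjb
        exact h.1 j hj
      · rw [if_neg hgj] at hjb
        simp at hjb
    · rw [if_neg hg]
      exact ih h.2

theorem fppNonempty_sorted (pages : List (List String)) :
    (fppNonempty pages).Pairwise (· < ·) := by
  rw [fppNonempty_eq]
  exact pairwise_filterMap_if _ _ (PySem.List.pairwise_lt_pyRange_one 0 _)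

-- the binary-search loop lands on the boundary between ≤ cur and > cur
theorem fppBSAux_spec (ne : List Int) (cur : Int)
    (hmono : ∀ a b : Nat, a ≤ b → b < ne.length → ne.getD a 0 ≤ ne.getD b 0) :
    ∀ (fuel lo hi : Nat), hi - lo ≤ fuel → lo ≤ hi → hi ≤ ne.length →
    (∀ j < lo, ne.getD j 0 ≤ cur) → (∀ j, hi ≤ j → j < ne.length → cur < ne.getD j 0) →
    (∀ j < fppBSAux ne cur fuel lo hi, ne.getD j 0 ≤ cur) ∧
    (∀ j, fppBSAux ne cur fuel lo hi ≤ j → j < ne.length → cur < ne.getD j 0) ∧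
    fppBSAux ne cur fuel lo hi ≤ ne.length := by
  intro fuel
  induction fuel with
  | zero =>
    intro lo hi hfuel hle hlen hlo hhi
    have : lo = hi := by omega
    subst this
    exact ⟨hlo, hhi, hlen⟩
  | succ fuel ih =>
    intro lo hi hfuel hle hlen hlo hhi
    by_cases hlt : lo < hi
    · rw [fppBSAux, if_pos hlt]
      by_cases hcmp : ne.getD ((lo + hi) / 2) 0 ≤ cur
      · simp only [hcmp, if_pos]
        refine ih ((lo + hi) / 2 + 1) hi (by omega) (by omega) hlen ?_ hhi
        intro j hj
        by_cases hjlo : j < lo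
        · exact hlo j hjlo
        · exact le_trans (hmono j ((lo + hi) / 2) (by omega) (by omega)) hcmp
      · simp only [if_neg hcmp]
        refine ih lo ((lo + hi) / 2) (by omega) (by omega) (by omega) hlo ?_
        intro j hj hjlen
        exact lt_of_lt_of_le (lt_of_not_ge hcmp) (hmono ((lo + hi) / 2) j hj hjlen)
    · rw [fppBSAux, if_neg hlt]
      have : lo = hi := by omega
      subst this
      exact ⟨hlo, hhi, hlen⟩

-- l.find? p when the first k elements fail p and all later ones satisfy it
theorem find?_boundary (l : List Int) (p : Int → Bool) :
    ∀ (k : Nat), k ≤ l.length →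
    (∀ j, j < k → p (l.getD j 0) = false) →
    (∀ j, k ≤ j → j < l.length → p (l.getD j 0) = true) →
    l.find? p = if k < l.length then some (l.getD k 0) else none := by
  induction l with
  | nil =>
    intro k hk _ _
    simp
  | cons a l ih =>
    intro k hk h1 h2
    match k with
    | 0 =>
      have ha : p a = true := by
        have := h2 0 (Nat.le_refl 0) (by simp)
        simpa using this
      simp [List.find?_cons_of_pos ha]
    | Nat.succ k =>
      have ha : p a = false := by
        have := h1 0 (Nat.succ_pos k)
        simpa using this
      rw [List.find?_cons_of_neg (by simp [ha])]
      rw [ih k (by simpa using hk)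
        (fun j hj => by simpa [List.getD_cons_succ] using h1 (j + 1) (by omega))
        (fun j hj hjl => by simpa [List.getD_cons_succ] using h2 (j + 1) (by omega) (by simpa using Nat.succ_lt_succ hjl))]
      by_cases hkl : k < l.length
      · rw [if_pos hkl, if_pos (by simpa using Nat.succ_lt_succ hkl), List.getD_cons_succ]
      · rw [if_neg hkl, if_neg (by simpa using fun h => hkl (Nat.lt_of_succ_lt_succ h))]

-- B, for pages_reach ≥ 1, is [cur_page] extended by the first non-empty index > cur_page
-- find? only looks at members, so an agreeing predicate gives the same result
theorem find?_congr_mem (l : List Int) (p q : Int → Bool) (h : ∀ x ∈ l, p x = q x) :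
    l.find? p = l.find? q := by
  induction l with
  | nil => rfl
  | cons a l ih =>
    rw [List.find?_cons, List.find?_cons, h a (List.mem_cons_self ..)]
    cases q a with
    | true => rfl
    | false => exact ih (fun x hx => h x (List.mem_cons_of_mem _ hx))

theorem fppB_eq (cur_page : Int) (pages_reach : Int) (pages : List (List String))
    (hpr : ¬ pages_reach < 1) :
    find_possible_pages_py_alt cur_page pages_reach pages =
      match (PySem.List.pyRange 0 (pages.length : Int) 1).find?
          (fun j => fppGood pages j && decide (cur_page < j)) with
      | none => [cur_page]
      | some i => [cur_page, i] := by
  have hmono : ∀ a b : Nat, a ≤ b → b < (fppNonempty pages).length →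
      (fppNonempty pages).getD a 0 ≤ (fppNonempty pages).getD b 0 := by
    intro a b hab hb
    rcases Nat.lt_or_ge a b with h | h
    · have := (List.pairwise_iff_getElem.mp (fppNonempty_sorted pages)) a b (by omega) hb h
      rw [List.getD_eq_getElem?_getD, List.getD_eq_getElem?_getD,
        List.getElem?_eq_getElem (by omega), List.getElem?_eq_getElem hb]
      exact le_of_lt this
    · have : a = b := by omega
      subst this
      exact le_refl _
  have hspec := fppBSAux_spec (fppNonempty pages) cur_page hmono
    ((fppNonempty pages).length - 0) 0 (fppNonempty pages).length (by omega) (by omega)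
    (le_refl _) (by omega) (by omega)
  have hfind : (fppNonempty pages).find? (fun x => decide (cur_page < x)) =
      if fppBSAux (fppNonempty pages) cur_page ((fppNonempty pages).length - 0) 0
          (fppNonempty pages).length < (fppNonempty pages).length then
        some ((fppNonempty pages).getD (fppBSAux (fppNonempty pages) cur_page
          ((fppNonempty pages).length - 0) 0 (fppNonempty pages).length) 0)
      else none := by
    refine find?_boundary (fppNonempty pages) _ _ hspec.2.2 ?_ ?_
    · intro j hj
      simpa using not_lt.mpr (hspec.1 j hj)
    · intro j hj hjl
      simpa using hspec.2.1 j hj hjl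
  have hrange : (PySem.List.pyRange 0 (pages.length : Int) 1).find?
      (fun j => fppGood pages j && decide (cur_page < j)) =
      (fppNonempty pages).find? (fun x => decide (cur_page < x)) := by
    rw [fppNonempty_eq, find?_filterMap_if]
  rw [hrange, hfind]
  simp only [find_possible_pages_py_alt, fppBS, if_neg hpr]
  split_ifs with h
  · rfl
  · rfl

-- the two scans agree outside D_: A's range find equals B's filtered find
theorem fpp_bridge (cur_page : Int) (pages_reach : Int) (pages : List (List String))
    (hpre : -(pages.length : Int) ≤ cur_page + 1)
    (hpr : 1 ≤ pages_reach)
    (hnd : ¬ D_find_possible_pages_py cur_page pages_reach pages) :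
    (PySem.List.pyRange (cur_page + 1) (pages.length : Int) 1).find? (fppGood pages)
      = (PySem.List.pyRange 0 (pages.length : Int) 1).find?
          (fun j => fppGood pages j && decide (cur_page < j)) := by
  by_cases hc : 0 ≤ cur_page + 1
  · by_cases hlen : (pages.length : Int) ≤ cur_page + 1
    · rw [PySem.List.pyRange_one_eq_nil hlen]
      rw [List.find?_nil, eq_comm, List.find?_eq_none]
      intro x hx
      rw [PySem.List.mem_pyRange_one] at hx
      simp only [Bool.and_eq_true, decide_eq_true_eq, not_and]
      intro _
      omega
    · rw [PySem.List.pyRange_one_append 0 (cur_page + 1) (pages.length : Int) hc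
        (le_of_not_ge hlen), List.find?_append]
      have h1 : (PySem.List.pyRange 0 (cur_page + 1) 1).find?
          (fun j => fppGood pages j && decide (cur_page < j)) = none := by
        rw [List.find?_eq_none]
        intro x hx
        rw [PySem.List.mem_pyRange_one] at hx
        simp only [Bool.and_eq_true, decide_eq_true_eq, not_and]
        intro _
        omega
      rw [h1, Option.none_or]
      exact (find?_congr_mem _ _ _ (fun x hx => by
        rw [PySem.List.mem_pyRange_one] at hx
        have : decide (cur_page < x) = true := by simp; omega
        rw [this, Bool.and_true])).symm
  · have hc' : cur_page + 1 < 0 := by omega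
    rw [PySem.List.pyRange_one_append (cur_page + 1) 0 (pages.length : Int) (by omega)
      (by positivity), List.find?_append]
    have hnone : ∀ j, j < pages.length → (pages.length : Int) + cur_page + 1 ≤ (j : Int) →
        (pages.getD j []).any (fun block => block ≠ "") = false := by
      intro j hj hjge
      by_contra hcon
      exact hnd ⟨hpr, hpre, hc', j, hj, hjge, by simpa using hcon⟩
    have h1 : (PySem.List.pyRange (cur_page + 1) 0 1).find? (fppGood pages) = none := by
      rw [List.find?_eq_none]
      intro i hi
      rw [PySem.List.mem_pyRange_one] at hi
      unfold fppGood
      rw [PySem.List.pyGet?_neg pages hi.2 (by omega)]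
      have hji : pages.length - (-i).toNat < pages.length := by omega
      rw [← List.getD_eq_getElem?_getD, Bool.not_eq_true]
      exact hnone (pages.length - (-i).toNat) hji (by omega)
    rw [h1, Option.none_or]
    exact (find?_congr_mem _ _ _ (fun x hx => by
      rw [PySem.List.mem_pyRange_one] at hx
      have : decide (cur_page < x) = true := by simp; omega
      rw [this, Bool.and_true])).symm

-- ===== VERDICT (by name: the statement is the Claim_ definition above) =====
theorem find_possible_pages_py_spec : Claim_unchanged_find_possible_pages_py := by
  intro cur_page pages_reach pages _ hpre hnd
  by_cases hlt : pages_reach < 1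
  · have : pages_reach.toNat = 0 := by omega
    simp [find_possible_pages_py, this, fppOuterA, find_possible_pages_py_alt, hlt]
  · have hrange : -(pages.length : Int) ≤ cur_page + 1 := by
      rcases hpre with h | h
      · omega
      · exact h
    rw [fppA_eq cur_page pages_reach pages hlt hrange,
        fppB_eq cur_page pages_reach pages hlt,
        fpp_bridge cur_page pages_reach pages hrange (by omega) hnd]

theorem find_possible_pages_py_changed : Claim_changed_find_possible_pages_py := by
  unfold Claim_changed_find_possible_pages_py; decide

theorem find_possible_pages_py_tight : Claim_exact_find_possible_pages_py := by
  intro cur_page pages_reach pages _ _ hd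
  obtain ⟨hpr, hge, hlt, j, hjlen, hjge, hjany⟩ := hd
  rw [fppA_eq cur_page pages_reach pages (by omega) hge,
    fppB_eq cur_page pages_reach pages (by omega)]
  rw [PySem.List.pyRange_one_append (cur_page + 1) 0 (pages.length : Int) (by omega)
    (by positivity), List.find?_append]
  have hsome : ((PySem.List.pyRange (cur_page + 1) 0 1).find? (fppGood pages)).isSome := by
    rw [List.find?_isSome]
    refine ⟨(j : Int) - (pages.length : Int), ?_, ?_⟩
    · rw [PySem.List.mem_pyRange_one]
      constructor <;> omega
    · unfold fppGood
      rw [PySem.List.pyGet?_neg pages (by omega) (by omega)]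
      have hjeq : pages.length - (-((j : Int) - (pages.length : Int))).toNat = j := by omega
      rw [hjeq, ← List.getD_eq_getElem?_getD]
      exact hjany
  obtain ⟨i, hi⟩ := Option.isSome_iff_exists.mp hsome
  have hineg : i < 0 := by
    have := List.mem_of_find?_eq_some hi
    rw [PySem.List.mem_pyRange_one] at this
    exact this.2
  rw [hi, Option.some_or]
  rcases hB : (PySem.List.pyRange 0 (pages.length : Int) 1).find?
      (fun j => fppGood pages j && decide (cur_page < j)) with _ | m
  · simp
  · have hm : 0 ≤ m := by
      have := List.mem_of_find?_eq_some hB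
      rw [PySem.List.mem_pyRange_one] at this
      exact this.1
    simp only [ne_eq, List.cons.injEq, and_true, true_and]
    omega
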